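-- pv_equiv track=rewrite | github.com/2018hsridhar/LEETCODE_REPO_2 | leetcode_454.py | addMerge
-- ===== SOURCE A (Python) =====
-- from typing import List
--
-- def addMerge(nums1: List[int], nums2: List[int]) -> dict():
--     resDict = {}
--     for a in nums1:
--         for b in nums2:
--             newKey = a + b
--             if newKey not in resDict:
--                 resDict[newKey] = 0
--             resDict[newKey] += 1
--     return resDict
-- ===== SOURCE B (Python) =====
-- def addMerge(nums1, nums2):
--     cnt2 = {}
--     for b in nums2:
--         cnt2[b] = cnt2.get(b, 0) + 1
--     res = {}
--     for a in nums1: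
--         for b, c in cnt2.items():
--             s = a + b
--             res[s] = res.get(s, 0) + c
--     return res
-- ===== Notes on version B (the rewrite author's own statement) =====
-- stated objective: alternative
-- what changed: B first builds a frequency map of nums2, then for each a in nums1 loops over the distinct values of nums2 only, adding count-weighted increments, instead of A's raw pair scan with per-pair increment-by-one.
import Mathlib
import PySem

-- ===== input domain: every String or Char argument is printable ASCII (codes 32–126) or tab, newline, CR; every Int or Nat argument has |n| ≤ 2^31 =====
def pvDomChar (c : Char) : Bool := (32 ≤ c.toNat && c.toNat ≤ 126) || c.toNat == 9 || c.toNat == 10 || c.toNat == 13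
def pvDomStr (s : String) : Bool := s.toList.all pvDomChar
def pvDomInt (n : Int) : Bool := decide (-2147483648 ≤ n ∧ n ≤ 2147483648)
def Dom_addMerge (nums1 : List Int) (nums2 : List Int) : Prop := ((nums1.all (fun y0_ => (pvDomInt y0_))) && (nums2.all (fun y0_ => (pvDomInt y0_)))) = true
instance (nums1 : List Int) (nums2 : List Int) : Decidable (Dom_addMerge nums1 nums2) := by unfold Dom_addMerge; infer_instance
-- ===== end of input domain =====

-- B builds a frequency map of nums2 once and loops over its distinct values with count-weighted
-- increments instead of A's raw pair scan; alternative decomposition, same results.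


-- ===== PORT A =====
def addMerge (nums1 : List Int) (nums2 : List Int) : List (Int × Int) :=
  (nums1.foldl (fun resDict a =>
    nums2.foldl (fun resDict b =>
      let newKey := a + b
      let resDict1 := if resDict.contains newKey then resDict else resDict.insert newKey 0
      resDict1.insert newKey (resDict1.getD newKey 0 + 1)) resDict)
    (PySem.Dict.empty : PySem.Dict Int Int)).items

-- ===== PORT B =====
def addMerge_alt (nums1 : List Int) (nums2 : List Int) : List (Int × Int) :=
  let cnt2 := nums2.foldl (fun d b => d.insert b (d.getD b 0 + 1)) (PySem.Dict.empty : PySem.Dict Int Int)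
  (nums1.foldl (fun res a =>
    cnt2.items.foldl (fun res p =>
      let s := a + p.1
      res.insert s (res.getD s 0 + p.2)) res)
    (PySem.Dict.empty : PySem.Dict Int Int)).items

-- ===== PRECONDITION & SPEC =====
def Spec_addMerge (nums1 : List Int) (nums2 : List Int) (out : List (Int × Int)) : Prop := out = addMerge_alt nums1 nums2
instance (nums1 : List Int) (nums2 : List Int) (out : List (Int × Int)) : Decidable (Spec_addMerge nums1 nums2 out) := by unfold Spec_addMerge; infer_instance

-- ===== CLAIM (what is proved, stated in full; the proofs are below) =====
def Claim_equal_addMerge : Prop := ∀ (nums1 : List Int) (nums2 : List Int), Dom_addMerge nums1 nums2 → Spec_addMerge nums1 nums2 (addMerge nums1 nums2)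

-- ===== LEMMAS AND PROOFS =====

-- "res[k] = res.get(k, 0) + c": the single counting step both programs are built from
def addk (d : PySem.Dict Int Int) (k c : Int) : PySem.Dict Int Int := d.insert k (d.getD k 0 + c)

-- A's inner body (membership test + seed 0 + increment) is exactly addk _ _ 1
lemma stepA_eq (d : PySem.Dict Int Int) (k : Int) :
    (let d1 := if d.contains k then d else d.insert k 0
     d1.insert k (d1.getD k 0 + 1)) = addk d k 1 := by
  by_cases h : d.contains k = true
  · simp [h, addk]
  · simp only [Bool.not_eq_true] at h
    simp only [h, if_false, Bool.false_eq_true, addk, PySem.Dict.getD_insert_self,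
      PySem.Dict.insert_insert_self, PySem.Dict.getD_of_not_contains (h := h)]

lemma combine (d : PySem.Dict Int Int) (k c1 c2 : Int) :
    addk (addk d k c1) k c2 = addk d k (c1 + c2) := by
  simp [addk, PySem.Dict.getD_insert_self, PySem.Dict.insert_insert_self, add_assoc]

-- two in-place inserts at distinct keys commute (as items lists) when the first key is already present
lemma insert_comm_of_contains (d : PySem.Dict Int Int) (k k' w w' : Int)
    (h : d.contains k = true) (hne : k' ≠ k) :
    (d.insert k' w').insert k w = (d.insert k w).insert k' w' := by
  apply PySem.Dict.ext
  have hk1 : (d.insert k' w').contains k = true := by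
    simp [PySem.Dict.contains_insert, h]
  rw [PySem.Dict.items_insert_of_contains _ _ hk1]
  by_cases hk' : d.contains k' = true
  · have hk'2 : (d.insert k w).contains k' = true := by
      simp [PySem.Dict.contains_insert, hk']
    rw [PySem.Dict.items_insert_of_contains _ _ hk', PySem.Dict.items_insert_of_contains _ _ hk'2,
      PySem.Dict.items_insert_of_contains _ _ h, List.map_map, List.map_map]
    apply List.map_congr_left
    intro p _
    by_cases h1 : p.1 = k <;> by_cases h2 : p.1 = k' <;>
      simp_all [Function.comp, Ne.symm hne]
  · have hk'f : d.contains k' = false := by simpa using hk'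
    have hk'2 : (d.insert k w).contains k' = false := by
      simp [PySem.Dict.contains_insert, hk'f]
      exact fun hkk => absurd hkk hne
    rw [PySem.Dict.items_insert_of_not_contains _ _ hk'f,
      PySem.Dict.items_insert_of_not_contains _ _ hk'2,
      PySem.Dict.items_insert_of_contains _ _ h, List.map_append]
    simp [hne]

lemma commute (d : PySem.Dict Int Int) (k k' c c' : Int)
    (h : d.contains k = true) (hne : k' ≠ k) :
    addk (addk d k' c') k c = addk (addk d k c) k' c' := by
  unfold addk
  rw [PySem.Dict.getD_insert_of_ne _ _ _ (Ne.symm hne), PySem.Dict.getD_insert_of_ne _ _ _ hne]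
  exact insert_comm_of_contains d k k' _ _ h hne

def rowfold (a : Int) (l : List (Int × Int)) (d : PySem.Dict Int Int) : PySem.Dict Int Int :=
  l.foldl (fun d p => addk d (a + p.1) p.2) d

lemma shift (a : Int) (l : List (Int × Int)) (d : PySem.Dict Int Int) (k c : Int)
    (h : d.contains k = true) (hl : ∀ p ∈ l, a + p.1 ≠ k) :
    rowfold a l (addk d k c) = addk (rowfold a l d) k c := by
  induction l generalizing d with
  | nil => rfl
  | cons p l ih =>
    simp only [rowfold, List.foldl_cons]
    rw [← commute d k (a + p.1) c p.2 h (hl p (List.mem_cons_self))]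
    exact ih (addk d (a + p.1) p.2)
      (by simp [addk, PySem.Dict.contains_insert, h])
      (fun q hq => hl q (List.mem_cons_of_mem _ hq))

def C (t : List Int) : PySem.Dict Int Int :=
  t.foldl (fun d b => d.insert b (d.getD b 0 + 1)) PySem.Dict.empty

-- replacing the value at the unique entry with key b is surgery on the items list
lemma map_replace (u w : List (Int × Int)) (b cv v : Int)
    (hu : b ∉ u.map Prod.fst) (hw : b ∉ w.map Prod.fst) :
    (u ++ (b, cv) :: w).map (fun p => if (p.1 == b) = true then (b, v) else p)
      = u ++ (b, v) :: w := by
  have hgen : ∀ (l : List (Int × Int)), b ∉ l.map Prod.fst →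
      l.map (fun p => if (p.1 == b) = true then ((b, v) : Int × Int) else p) = l := by
    intro l hl
    have hp : ∀ p ∈ l, (if (p.1 == b) = true then ((b, v) : Int × Int) else p) = p := by
      intro p hp
      rw [if_neg]
      simp only [beq_iff_eq]
      exact fun e => hl (e ▸ List.mem_map_of_mem hp)
    rw [List.map_congr_left hp, List.map_id']
  rw [List.map_append, List.map_cons, hgen u hu, hgen w hw]
  simp

-- the row lemma: one pass of A's inner loop equals one count-weighted pass over (C nums2).items
lemma row_eq (n2 : List Int) (a : Int) (d : PySem.Dict Int Int) :
    n2.foldl (fun d b => addk d (a + b) 1) d = rowfold a (C n2).items d := by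
  induction n2 using List.reverseRecOn with
  | nil => rfl
  | append_singleton t b ih =>
    rw [List.foldl_append, List.foldl_cons, List.foldl_nil]
    have hC : C (t ++ [b]) = (C t).insert b ((C t).getD b 0 + 1) := by
      simp [C, List.foldl_append]
    rw [hC]
    by_cases hc : (C t).contains b = true
    · have hsome : ((C t).get? b).isSome := by
        rw [← PySem.Dict.contains_eq_isSome_get?]; exact hc
      obtain ⟨cv, hcv⟩ := Option.isSome_iff_exists.mp hsome
      have hmem : (b, cv) ∈ (C t).items := PySem.Dict.mem_items_of_get?_eq_some _ hcv
      obtain ⟨u, w, hitems⟩ := List.append_of_mem hmem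
      have hgetD : (C t).getD b 0 = cv := PySem.Dict.getD_of_get?_eq_some _ _ hcv
      have hnd : (C t).keys.Nodup :=
        PySem.Dict.nodup_keys_foldl_insert _ _ _ PySem.Dict.nodup_keys_empty
      have hnd2 : (u.map Prod.fst ++ b :: w.map Prod.fst).Nodup := by
        have := hnd
        simp only [PySem.Dict.keys, hitems, List.map_append, List.map_cons] at this
        exact this
      obtain ⟨h1, h2, hdisj⟩ := List.nodup_append.mp hnd2
      have hbw : b ∉ w.map Prod.fst := (List.nodup_cons.mp h2).1
      have hbu : b ∉ u.map Prod.fst := fun hb => hdisj b hb b List.mem_cons_self rfl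
      rw [PySem.Dict.items_insert_of_contains _ _ hc, hitems, hgetD,
        map_replace u w b cv (cv + 1) hbu hbw]
      have hsplit : rowfold a (u ++ (b, cv + 1) :: w) d
          = rowfold a w (addk (rowfold a u d) (a + b) (cv + 1)) := by
        simp [rowfold, List.foldl_append]
      rw [hsplit, show addk (rowfold a u d) (a + b) (cv + 1)
            = addk (addk (rowfold a u d) (a + b) cv) (a + b) 1 from (combine _ _ _ _).symm,
        shift a w (addk (rowfold a u d) (a + b) cv) (a + b) 1
          (by simp [addk, PySem.Dict.contains_insert_self])
          (fun p hp e => hbw (by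
            have : p.1 = b := by omega
            exact this ▸ List.mem_map_of_mem hp))]
      rw [ih, hitems]
      congr 1
      simp [rowfold, List.foldl_append]
    · have hcf : (C t).contains b = false := by simpa using hc
      rw [PySem.Dict.items_insert_of_not_contains _ _ hcf,
        PySem.Dict.getD_of_not_contains _ _ hcf]
      have hsplit : rowfold a ((C t).items ++ [(b, 0 + 1)]) d
          = addk (rowfold a (C t).items d) (a + b) (0 + 1) := by
        simp [rowfold, List.foldl_append]
      rw [hsplit, ih]
      norm_num


lemma main_eq (n1 n2 : List Int) : addMerge n1 n2 = addMerge_alt n1 n2 := by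
  show (n1.foldl (fun d a => n2.foldl (fun d b =>
      let newKey := a + b
      let d1 := if d.contains newKey then d else d.insert newKey 0
      d1.insert newKey (d1.getD newKey 0 + 1)) d) PySem.Dict.empty).items
    = (n1.foldl (fun d a => rowfold a (C n2).items d) PySem.Dict.empty).items
  have hstep : (fun (d : PySem.Dict Int Int) (a : Int) => n2.foldl (fun d b =>
      let newKey := a + b
      let d1 := if d.contains newKey then d else d.insert newKey 0
      d1.insert newKey (d1.getD newKey 0 + 1)) d)
      = fun d a => rowfold a (C n2).items d := by
    funext d a
    rw [show (fun (d : PySem.Dict Int Int) (b : Int) =>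
        let newKey := a + b
        let d1 := if d.contains newKey then d else d.insert newKey 0
        d1.insert newKey (d1.getD newKey 0 + 1)) = fun d b => addk d (a + b) 1
      from funext fun d => funext fun b => stepA_eq d (a + b)]
    exact row_eq n2 a d
  rw [hstep]

-- ===== VERDICT (by name: the statement is the Claim_ definition above) =====
theorem addMerge_spec : Claim_equal_addMerge := by
  intro n1 n2 _
  exact main_eq n1 n2
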